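-- pv_equiv track=rewrite | github.com/barnold-xyz/advent | 2023/18/18.py | count_crosses
-- ===== SOURCE A (Python) =====
-- def count_crosses(grid, trench, x_values):
--     crosses = {}
--     for (x, y) in grid:
--         if (x, y) in trench:
--             crosses[(x, y)] = 0
--             continue
--         count = 0
--         for x2 in range(min(x_values), x):
--             if (x2, y) in trench and (x2 - 1, y) not in trench:
--                 count += 1
--         crosses[(x, y)] = count
--     return crosses
-- ===== SOURCE B (Python) =====
-- def count_crosses(grid, trench, x_values):
--     tset = set(trench)
--     rows = {}
--     for (tx, ty) in dict.fromkeys(trench):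
--         if (tx - 1, ty) not in tset:
--             rows.setdefault(ty, []).append(tx)
--     mn = min(x_values) if x_values else None
--     crosses = {}
--     for (x, y) in grid:
--         if (x, y) in tset:
--             crosses[(x, y)] = 0
--         else:
--             crosses[(x, y)] = sum(1 for e in rows.get(y, []) if mn <= e < x)
--     return crosses
-- ===== Notes on version B (the rewrite author's own statement) =====
-- stated objective: faster
-- what changed: Instead of scanning every x2 in range(min, x) with O(|trench|) list membership per step, B precomputes a trench hash set and a per-row list of left-edge x-coordinates once, then counts per cell by filtering that short row list.
import Mathlib
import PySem

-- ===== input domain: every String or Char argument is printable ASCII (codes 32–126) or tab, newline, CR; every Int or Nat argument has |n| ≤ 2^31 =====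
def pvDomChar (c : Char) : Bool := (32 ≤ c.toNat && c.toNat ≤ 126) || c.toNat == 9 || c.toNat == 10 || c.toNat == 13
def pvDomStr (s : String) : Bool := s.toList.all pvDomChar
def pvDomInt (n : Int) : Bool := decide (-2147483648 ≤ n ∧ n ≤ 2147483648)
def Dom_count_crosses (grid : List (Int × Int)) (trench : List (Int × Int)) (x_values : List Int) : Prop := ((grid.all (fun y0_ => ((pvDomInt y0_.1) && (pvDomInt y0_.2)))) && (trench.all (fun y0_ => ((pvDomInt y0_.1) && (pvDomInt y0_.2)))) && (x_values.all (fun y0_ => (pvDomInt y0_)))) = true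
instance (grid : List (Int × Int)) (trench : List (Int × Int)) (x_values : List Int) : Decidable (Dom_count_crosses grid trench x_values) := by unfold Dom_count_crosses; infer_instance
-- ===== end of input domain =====

-- B replaces A's per-cell scan of range(min, x) (with list membership tests) by a
-- precomputed per-row list of left-edge x-coordinates, counted by a filter per cell.

-- ===== PORT A =====
def count_crosses (grid : List (Int × Int)) (trench : List (Int × Int)) (x_values : List Int) : List (Int × Int × Int) :=
  let crosses := grid.foldl (fun (d : PySem.Dict (Int × Int) Int) p =>
    if trench.contains p then d.insert p 0
    else
      -- min(x_values): ValueError on [], totalized with .getD 0 (excluded by Pre_)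
      let count := (PySem.List.pyRange ((PySem.List.min? x_values (fun v => v)).getD 0) p.1 1).foldl
        (fun c x2 => if trench.contains (x2, p.2) && !(trench.contains (x2 - 1, p.2)) then c + 1 else c) 0
      d.insert p count) PySem.Dict.empty
  crosses.items.map (fun q => (q.1.1, q.1.2, q.2))

-- ===== PORT B =====
def count_crosses_alt (grid : List (Int × Int)) (trench : List (Int × Int)) (x_values : List Int) : List (Int × Int × Int) :=
  let tset : PySem.Set (Int × Int) := PySem.Set.ofList trench
  let rows := (PySem.List.dedup trench).foldl
    (fun (r : PySem.Dict Int (List Int)) q =>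
      if !(PySem.Set.contains tset (q.1 - 1, q.2)) then r.modify q.2 [] (fun l => l ++ [q.1]) else r)
    PySem.Dict.empty
  -- min(x_values) if x_values else None; the None branch is unreachable under Pre_, totalized with .getD 0
  let mn := (PySem.List.min? x_values (fun v => v)).getD 0
  let crosses := grid.foldl (fun (d : PySem.Dict (Int × Int) Int) p =>
    if PySem.Set.contains tset p then d.insert p 0
    else d.insert p (((rows.getD p.2 []).filter (fun e => mn ≤ e && e < p.1)).length : Int))
    PySem.Dict.empty
  crosses.items.map (fun q => (q.1.1, q.1.2, q.2))

-- ===== PRECONDITION & SPEC =====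
-- Pre_ excludes exactly the inputs where Python A raises: min([]) (ValueError) is reached
-- iff x_values is empty and some grid cell is not in trench.
def Pre_count_crosses (grid : List (Int × Int)) (trench : List (Int × Int)) (x_values : List Int) : Prop :=
  x_values ≠ [] ∨ ∀ p ∈ grid, p ∈ trench
instance (grid : List (Int × Int)) (trench : List (Int × Int)) (x_values : List Int) : Decidable (Pre_count_crosses grid trench x_values) := by unfold Pre_count_crosses; infer_instance
def pvWitness_count_crosses : (List (Int × Int)) × (List (Int × Int)) × List Int := ([(1, 0), (3, 0)], [(0, 0), (2, 0)], [0])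
def Spec_count_crosses (grid : List (Int × Int)) (trench : List (Int × Int)) (x_values : List Int) (out : List (Int × Int × Int)) : Prop := out = count_crosses_alt grid trench x_values
instance (grid : List (Int × Int)) (trench : List (Int × Int)) (x_values : List Int) (out : List (Int × Int × Int)) : Decidable (Spec_count_crosses grid trench x_values out) := by unfold Spec_count_crosses; infer_instance

-- ===== CLAIM (what is proved, stated in full; the proofs are below) =====
def Claim_equal_count_crosses : Prop := ∀ (grid : List (Int × Int)) (trench : List (Int × Int)) (x_values : List Int), Dom_count_crosses grid trench x_values → Pre_count_crosses grid trench x_values → Spec_count_crosses grid trench x_values (count_crosses grid trench x_values)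

-- ===== LEMMAS AND PROOFS =====

-- the per-row fold in B appends q.1 for every edge pair with row y, in order
theorem pv_rows_getD (l : List (Int × Int)) (tset : PySem.Set (Int × Int))
    (r : PySem.Dict Int (List Int)) (y : Int) :
    (l.foldl (fun (r : PySem.Dict Int (List Int)) q =>
        if !(PySem.Set.contains tset (q.1 - 1, q.2)) then r.modify q.2 [] (fun l => l ++ [q.1]) else r) r).getD y []
      = r.getD y [] ++ (l.filter (fun q => !(PySem.Set.contains tset (q.1 - 1, q.2)) && q.2 == y)).map (·.1) := by
  induction l generalizing r with
  | nil => simp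
  | cons q l ih =>
    rw [List.foldl_cons]
    by_cases h : (q.1 - 1, q.2) ∈ tset
    · rw [if_neg (by simp [h]), ih, List.filter_cons]
      simp [h]
    · rw [if_pos (by simp [h]), ih, List.filter_cons, PySem.Dict.getD_modify]
      by_cases hy : y = q.2
      · subst hy
        simp [h, List.append_assoc]
      · have hb : (q.2 == y) = false := by simp [Ne.symm hy]
        simp [hy, hb, h]

-- two Nodup lists with the same members have the same length
theorem pv_length_eq_of_nodup {α : Type} [DecidableEq α] {l1 l2 : List α}
    (h1 : l1.Nodup) (h2 : l2.Nodup) (h : ∀ a, a ∈ l1 ↔ a ∈ l2) : l1.length = l2.length := by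
  rw [← List.toFinset_card_of_nodup h1, ← List.toFinset_card_of_nodup h2]
  congr 1
  ext a
  simp [h a]

-- the core counting identity: A's range scan equals B's row-list filter
theorem pv_count_eq (trench : List (Int × Int)) (mn x y : Int) :
    ((PySem.List.pyRange mn x 1).filter
        (fun x2 => trench.contains (x2, y) && !(trench.contains (x2 - 1, y)))).length
      = (((PySem.List.dedup trench).foldl
          (fun (r : PySem.Dict Int (List Int)) q =>
            if !(PySem.Set.contains (PySem.Set.ofList trench) (q.1 - 1, q.2)) then r.modify q.2 [] (fun l => l ++ [q.1]) else r)
          PySem.Dict.empty).getD y []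
         |>.filter (fun e => mn ≤ e && e < x)).length := by
  rw [pv_rows_getD]
  simp only [PySem.Dict.getD_empty, List.nil_append]
  apply pv_length_eq_of_nodup
  · exact (PySem.List.nodup_pyRange_one mn x).filter _
  · apply List.Nodup.filter
    apply List.Nodup.map_on _ ((PySem.List.nodup_dedup trench).filter _)
    intro a ha b hb hab
    simp only [List.mem_filter, Bool.and_eq_true, beq_iff_eq] at ha hb
    exact Prod.ext hab (ha.2.2.trans hb.2.2.symm)
  · intro a
    simp only [List.mem_filter, PySem.List.mem_pyRange_one, List.mem_map, Bool.and_eq_true,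
      decide_eq_true_eq, Bool.not_eq_true', beq_iff_eq]
    constructor
    · rintro ⟨⟨hmn, hx⟩, ht, hnt⟩
      refine ⟨⟨(a, y), ⟨?_, ?_, rfl⟩, rfl⟩, hmn, hx⟩
      · simpa [PySem.List.mem_dedup] using ht
      · have h2 : (a - 1, y) ∉ trench := by simpa using hnt
        simp [PySem.Set.contains_eq_listContains, PySem.Set.mem_ofList, h2]
    · rintro ⟨⟨q, ⟨hqm, hqn, hqy⟩, hq1⟩, hmn, hx⟩
      subst hq1
      refine ⟨⟨hmn, hx⟩, ?_, ?_⟩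
      · rw [← hqy]
        have hq' : q ∈ trench := by simpa [PySem.List.mem_dedup] using hqm
        simpa using hq'
      · rw [← hqy]
        have h2 : (q.1 - 1, q.2) ∉ trench := by
          simpa [PySem.Set.contains_eq_listContains, PySem.Set.mem_ofList] using hqn
        simpa using h2

theorem count_crosses_eq_alt (grid trench : List (Int × Int)) (x_values : List Int) :
    count_crosses grid trench x_values = count_crosses_alt grid trench x_values := by
  simp only [count_crosses, count_crosses_alt]
  congr 1
  congr 1
  apply PySem.List.foldl_congr_mem
  intro d p _
  rw [show PySem.Set.contains (PySem.Set.ofList trench) p = trench.contains p from by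
    simp [PySem.Set.contains_eq_listContains, PySem.Set.mem_ofList]]
  by_cases h : trench.contains p = true
  · rw [if_pos h, if_pos h]
  · rw [if_neg h, if_neg h]
    congr 1
    rw [PySem.List.foldl_if_add_one, List.countP_eq_length_filter,
        pv_count_eq trench ((PySem.List.min? x_values (fun v => v)).getD 0) p.1 p.2]
    simp

-- ===== VERDICT (by name: the statement is the Claim_ definition above) =====
theorem count_crosses_spec : Claim_equal_count_crosses := by
  intro grid trench x_values _ _
  unfold Spec_count_crosses
  exact count_crosses_eq_alt grid trench x_values
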